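-- pv_equiv track=rewrite | github.com/NatriClorua/funtion- | funtion.py | tim_vi_tri_ptu_lon_nhat_ma_tran
-- ===== SOURCE A (Python) =====
-- def tim_vi_tri_ptu_lon_nhat_ma_tran(ma_tran):
--     max_ptu = ma_tran[0][0]
--     vtri = (0,0)
--     for i in range (len(ma_tran)):
--         for j in range (len(ma_tran[0])):
--             if ma_tran[i][j] > max_ptu:
--                 max_ptu = ma_tran[i][j]
--                 vtri = (i,j)
--     return vtri
-- ===== SOURCE B (Python) =====
-- def tim_vi_tri_ptu_lon_nhat_ma_tran(ma_tran):
--     # Two-pass decomposition: per-row (value, row, col) table of the first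
--     # in-row maximum over the first len(ma_tran[0]) columns, then pick the
--     # first table entry with the largest value.
--     w = len(ma_tran[0])
--     table = []
--     for i, row in enumerate(ma_tran):
--         bj = 0
--         for j in range(1, w):
--             if row[j] > row[bj]:
--                 bj = j
--         table.append((row[bj], i, bj))
--     best = table[0]
--     for t in table[1:]:
--         if t[0] > best[0]:
--             best = t
--     return (best[1], best[2])
-- ===== Notes on version B (the rewrite author's own statement) =====
-- stated objective: alternative
-- what changed: Replaces the single nested scan with one global running-max accumulator by a two-pass decomposition: first build a per-row table of (row maximum, row, first column achieving it), then scan that table for the first entry with the largest value.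
import Mathlib
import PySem

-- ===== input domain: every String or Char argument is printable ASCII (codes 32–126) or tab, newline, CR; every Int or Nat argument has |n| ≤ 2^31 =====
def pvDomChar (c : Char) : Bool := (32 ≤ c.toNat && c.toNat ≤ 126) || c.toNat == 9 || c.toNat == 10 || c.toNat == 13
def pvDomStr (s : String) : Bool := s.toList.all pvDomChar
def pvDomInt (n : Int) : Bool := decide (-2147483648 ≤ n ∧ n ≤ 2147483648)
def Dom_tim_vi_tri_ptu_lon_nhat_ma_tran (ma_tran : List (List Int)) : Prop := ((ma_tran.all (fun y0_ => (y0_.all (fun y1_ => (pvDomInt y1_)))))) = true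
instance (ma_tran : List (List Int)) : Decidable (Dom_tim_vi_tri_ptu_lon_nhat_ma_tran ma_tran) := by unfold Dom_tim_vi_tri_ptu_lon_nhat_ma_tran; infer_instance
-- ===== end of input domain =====

-- B replaces A's single nested scan carrying one global running max by a two-pass
-- decomposition (per-row argmax table, then a scan of the table); equal return value on Pre_.

-- ===== PORT A =====
def tim_vi_tri_ptu_lon_nhat_ma_tran (ma_tran : List (List Int)) : Int × Int :=
  ((PySem.List.pyRange 0 (ma_tran.length : Int) 1).foldl
    (fun st i =>
      (PySem.List.pyRange 0 ((PySem.List.pyGetD ma_tran 0 []).length : Int) 1).foldl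
        (fun st j =>
          if PySem.List.pyGetD (PySem.List.pyGetD ma_tran i []) j 0 > st.1 then
            (PySem.List.pyGetD (PySem.List.pyGetD ma_tran i []) j 0, (i, j))
          else st) st)
    (PySem.List.pyGetD (PySem.List.pyGetD ma_tran 0 []) 0 0, ((0 : Int), (0 : Int)))).2

-- ===== PORT B =====
-- the inner 'for j in range(1, w): if row[j] > row[bj]: bj = j' loop of Source B
def pvRowBest (row : List Int) (w : Int) : Int :=
  (PySem.List.pyRange 1 w 1).foldl
    (fun bj j => if PySem.List.pyGetD row j 0 > PySem.List.pyGetD row bj 0 then j else bj) 0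

def tim_vi_tri_ptu_lon_nhat_ma_tran_alt (ma_tran : List (List Int)) : Int × Int :=
  let w : Int := ((PySem.List.pyGetD ma_tran 0 []).length : Int)
  let table : List (Int × Int × Int) :=
    (PySem.List.enumerate ma_tran 0).map (fun p =>
      (PySem.List.pyGetD p.2 (pvRowBest p.2 w) 0, p.1, pvRowBest p.2 w))
  match table with
  | [] => (0, 0)  -- unreachable under Pre_ (Source B raises IndexError on table[0])
  | t0 :: rest =>
    let r := rest.foldl (fun b t => if t.1 > b.1 then t else b) t0
    (r.2.1, r.2.2)

-- ===== PRECONDITION & SPEC =====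
-- Pre_ is exactly where the Python A returns: a nonempty matrix with a nonempty first
-- row and every row at least as long as the first (otherwise A raises IndexError).
def Pre_tim_vi_tri_ptu_lon_nhat_ma_tran (ma_tran : List (List Int)) : Prop :=
  ma_tran ≠ [] ∧ ma_tran.headI ≠ [] ∧ ∀ row ∈ ma_tran, ma_tran.headI.length ≤ row.length
instance (ma_tran : List (List Int)) : Decidable (Pre_tim_vi_tri_ptu_lon_nhat_ma_tran ma_tran) := by unfold Pre_tim_vi_tri_ptu_lon_nhat_ma_tran; infer_instance

def pvWitness_tim_vi_tri_ptu_lon_nhat_ma_tran : List (List Int) := [[1, 5], [7, 2]]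

def Spec_tim_vi_tri_ptu_lon_nhat_ma_tran (ma_tran : List (List Int)) (out : Int × Int) : Prop := out = tim_vi_tri_ptu_lon_nhat_ma_tran_alt ma_tran
instance (ma_tran : List (List Int)) (out : Int × Int) : Decidable (Spec_tim_vi_tri_ptu_lon_nhat_ma_tran ma_tran out) := by unfold Spec_tim_vi_tri_ptu_lon_nhat_ma_tran; infer_instance

-- ===== CLAIM (what is proved, stated in full; the proofs are below) =====
def Claim_equal_tim_vi_tri_ptu_lon_nhat_ma_tran : Prop := ∀ (ma_tran : List (List Int)), Dom_tim_vi_tri_ptu_lon_nhat_ma_tran ma_tran → Pre_tim_vi_tri_ptu_lon_nhat_ma_tran ma_tran → Spec_tim_vi_tri_ptu_lon_nhat_ma_tran ma_tran (tim_vi_tri_ptu_lon_nhat_ma_tran ma_tran)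

-- ===== LEMMAS AND PROOFS =====

-- B's row loop never decreases the tracked value
lemma pvB1 (row : List Int) (js : List Int) : ∀ b : Int,
    PySem.List.pyGetD row b 0 ≤
      PySem.List.pyGetD row (js.foldl (fun bj j => if PySem.List.pyGetD row j 0 > PySem.List.pyGetD row bj 0 then j else bj) b) 0 := by
  induction js with
  | nil => intro b; simp
  | cons j t ih =>
    intro b
    simp only [List.foldl_cons]
    by_cases h : PySem.List.pyGetD row j 0 > PySem.List.pyGetD row b 0
    · simp only [if_pos h]; exact le_trans (le_of_lt h) (ih j)
    · simp only [if_neg h]; exact ih b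

-- B's row loop moves only on a strict increase
lemma pvB2 (row : List Int) (js : List Int) : ∀ b : Int,
    js.foldl (fun bj j => if PySem.List.pyGetD row j 0 > PySem.List.pyGetD row bj 0 then j else bj) b = b ∨
      PySem.List.pyGetD row b 0 <
        PySem.List.pyGetD row (js.foldl (fun bj j => if PySem.List.pyGetD row j 0 > PySem.List.pyGetD row bj 0 then j else bj) b) 0 := by
  induction js with
  | nil => intro b; exact Or.inl rfl
  | cons j t ih =>
    intro b
    simp only [List.foldl_cons]
    by_cases h : PySem.List.pyGetD row j 0 > PySem.List.pyGetD row b 0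
    · simp only [if_pos h]
      exact Or.inr (lt_of_lt_of_le h (pvB1 row t j))
    · simp only [if_neg h]; exact ih b

-- A's inner loop from state (m, v) against B's running argmax, over the same index list
lemma pvInner (row : List Int) (i : Int) (js : List Int) : ∀ (m : Int) (v : Int × Int) (b : Int),
    PySem.List.pyGetD row b 0 ≤ m →
    js.foldl (fun st j =>
        if PySem.List.pyGetD row j 0 > st.1 then (PySem.List.pyGetD row j 0, (i, j)) else st) (m, v)
      = (if PySem.List.pyGetD row (js.foldl (fun bj j => if PySem.List.pyGetD row j 0 > PySem.List.pyGetD row bj 0 then j else bj) b) 0 > m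
         then (PySem.List.pyGetD row (js.foldl (fun bj j => if PySem.List.pyGetD row j 0 > PySem.List.pyGetD row bj 0 then j else bj) b) 0,
               (i, js.foldl (fun bj j => if PySem.List.pyGetD row j 0 > PySem.List.pyGetD row bj 0 then j else bj) b))
         else (m, v)) := by
  induction js with
  | nil =>
    intro m v b hb
    simp only [List.foldl_nil]
    rw [if_neg (by omega)]
  | cons j t ih =>
    intro m v b hb
    simp only [List.foldl_cons]
    by_cases hj : PySem.List.pyGetD row j 0 > m
    · have hjb : PySem.List.pyGetD row j 0 > PySem.List.pyGetD row b 0 := lt_of_le_of_lt hb hj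
      rw [if_pos hj, if_pos hjb]
      rw [ih (PySem.List.pyGetD row j 0) (i, j) j le_rfl]
      have h1 := pvB1 row t j
      rcases pvB2 row t j with h2 | h2
      · rw [h2]
        rw [if_neg (by omega), if_pos hj]
      · rw [if_pos h2, if_pos (lt_trans hj h2)]
    · rw [if_neg hj]
      by_cases hjb : PySem.List.pyGetD row j 0 > PySem.List.pyGetD row b 0
      · rw [if_pos hjb]
        exact ih m v j (by omega)
      · rw [if_neg hjb]
        exact ih m v b hb

-- A's full inner loop over range(0, w) equals the update by B's table entry for the row
lemma pvRow (row : List Int) (i : Int) (w : Int) (hw : 0 < w) (m : Int) (v : Int × Int) :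
    (PySem.List.pyRange 0 w 1).foldl
      (fun st j => if PySem.List.pyGetD row j 0 > st.1 then (PySem.List.pyGetD row j 0, (i, j)) else st) (m, v)
    = (if PySem.List.pyGetD row (pvRowBest row w) 0 > m
       then (PySem.List.pyGetD row (pvRowBest row w) 0, (i, pvRowBest row w)) else (m, v)) := by
  rw [PySem.List.pyRange_one_cons hw]
  simp only [List.foldl_cons, pvRowBest, zero_add]
  have h1 := pvB1 row (PySem.List.pyRange 1 w 1) 0
  by_cases h0 : PySem.List.pyGetD row 0 0 > m
  · rw [if_pos h0]
    rw [pvInner row i (PySem.List.pyRange 1 w 1) (PySem.List.pyGetD row 0 0) (i, 0) 0 le_rfl]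
    rcases pvB2 row (PySem.List.pyRange 1 w 1) 0 with h2 | h2
    · rw [h2]
      rw [if_neg (by omega), if_pos h0]
    · rw [if_pos h2, if_pos (lt_trans h0 h2)]
  · rw [if_neg h0]
    exact pvInner row i (PySem.List.pyRange 1 w 1) m v 0 (by omega)

-- 'for i in range(len(xs)): … xs[i] …' is a fold over enumerate(xs)
lemma pvBridge {β σ : Type} (d : β) (g : Int → β → σ → σ) :
    ∀ (ys xs : List β) (a : Nat), xs.drop a = ys → ∀ (st : σ),
      (PySem.List.pyRange (a : Int) (xs.length : Int) 1).foldl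
          (fun st i => g i (PySem.List.pyGetD xs i d) st) st
        = (PySem.List.enumerate ys (a : Int)).foldl (fun st p => g p.1 p.2 st) st := by
  intro ys
  induction ys with
  | nil =>
    intro xs a h st
    have hlen : xs.length ≤ a := by
      by_contra hc
      have := List.drop_eq_nil_iff.mp h
      omega
    rw [PySem.List.pyRange_one_eq_nil (by exact_mod_cast hlen)]
    simp [PySem.List.enumerate]
  | cons y t ih =>
    intro xs a h st
    have ha : a < xs.length := by
      by_contra hc
      rw [List.drop_eq_nil_iff.mpr (by omega)] at h
      simp at h
    have hy : xs[a]? = some y := by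
      have h0 := congrArg (fun l => l[0]?) h
      simpa [List.getElem?_drop] using h0
    have ht : xs.drop (a + 1) = t := by
      have : xs.drop (a + 1) = (xs.drop a).drop 1 := by
        rw [List.drop_drop]
      rw [this, h]; rfl
    rw [PySem.List.pyRange_one_cons (by exact_mod_cast ha)]
    simp only [List.foldl_cons]
    have hget : PySem.List.pyGetD xs (a : Int) d = y := by
      rw [PySem.List.pyGetD_natCast]
      rw [List.getD_eq_getElem?_getD, hy]
      rfl
    rw [hget]
    have hcast : (a : Int) + 1 = ((a + 1 : Nat) : Int) := by push_cast; ring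
    rw [hcast, ih xs (a + 1) ht]
    simp [PySem.List.enumerate]

-- ===== VERDICT (by name: the statement is the Claim_ definition above) =====
theorem tim_vi_tri_ptu_lon_nhat_ma_tran_spec : Claim_equal_tim_vi_tri_ptu_lon_nhat_ma_tran := by
  intro ma_tran _ hpre
  obtain ⟨hne, hh, _⟩ := hpre
  obtain ⟨r0, rs, rfl⟩ := List.exists_cons_of_ne_nil hne
  have hr0ne : r0 ≠ [] := by simpa using hh
  have hw : 0 < ((r0.length : Int)) := by
    have : 0 < r0.length := List.length_pos_of_ne_nil hr0ne
    exact_mod_cast this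
  unfold Spec_tim_vi_tri_ptu_lon_nhat_ma_tran
  unfold tim_vi_tri_ptu_lon_nhat_ma_tran tim_vi_tri_ptu_lon_nhat_ma_tran_alt
  simp only [PySem.List.pyGetD_zero_cons]
  have hb := pvBridge ([] : List Int)
      (fun i row st =>
        (PySem.List.pyRange 0 ((r0.length : Int)) 1).foldl
          (fun st j =>
            if PySem.List.pyGetD row j 0 > st.1 then (PySem.List.pyGetD row j 0, (i, j)) else st) st)
      (r0 :: rs) (r0 :: rs) 0 rfl
      ((PySem.List.pyGetD r0 0 0, ((0 : Int), (0 : Int))) : Int × (Int × Int))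
  simp only [Nat.cast_zero] at hb
  rw [hb]
  have hf : (fun (st : Int × (Int × Int)) (p : Int × List Int) =>
      (PySem.List.pyRange 0 ((r0.length : Int)) 1).foldl
        (fun st j =>
          if PySem.List.pyGetD p.2 j 0 > st.1 then (PySem.List.pyGetD p.2 j 0, (p.1, j)) else st) st)
      = (fun (st : Int × (Int × Int)) (p : Int × List Int) =>
          if PySem.List.pyGetD p.2 (pvRowBest p.2 ((r0.length : Int))) 0 > st.1
          then (PySem.List.pyGetD p.2 (pvRowBest p.2 ((r0.length : Int))) 0, (p.1, pvRowBest p.2 ((r0.length : Int))))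
          else st) := by
    funext st p
    exact pvRow p.2 p.1 _ hw st.1 st.2
  rw [hf]
  simp only [PySem.List.enumerate, List.foldl_cons, List.map_cons, List.foldl_map]
  have ht0 : (if PySem.List.pyGetD r0 (pvRowBest r0 ((r0.length : Int))) 0 > PySem.List.pyGetD r0 0 0
      then (PySem.List.pyGetD r0 (pvRowBest r0 ((r0.length : Int))) 0, ((0 : Int), pvRowBest r0 ((r0.length : Int))))
      else ((PySem.List.pyGetD r0 0 0 : Int), ((0 : Int), (0 : Int))))
      = (PySem.List.pyGetD r0 (pvRowBest r0 ((r0.length : Int))) 0, ((0 : Int), pvRowBest r0 ((r0.length : Int)))) := by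
    rcases pvB2 r0 (PySem.List.pyRange 1 ((r0.length : Int)) 1) 0 with h2 | h2
    · rw [pvRowBest, h2]
      rw [if_neg (by omega)]
    · rw [if_pos (by rw [pvRowBest]; exact h2)]
  rw [ht0]
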